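-- pv_equiv track=rewrite | github.com/giunzz/PYTHON_UTE | TT/Chuong10/Hoang_Ngoc_Dung_C10/bai12c10.py | is_upside_down
-- ===== SOURCE A (Python) =====
-- def is_upside_down(number):
--     upside_down_pairs = {'0': '0', '1': '1', '6': '9', '8': '8', '9': '6'}
--     upside_down_str = ''
--     for digit in str(number):
--         if digit not in upside_down_pairs:
--             return False
--         upside_down_str += upside_down_pairs[digit]
--     return upside_down_str == str(number)[::-1]
-- ===== SOURCE B (Python) =====
-- def is_upside_down(number):
--     upside_down_pairs = {'0': '0', '1': '1', '6': '9', '8': '8', '9': '6'}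
--     s = str(number)
--     n = len(s)
--     for i in range((n + 1) // 2):
--         c = s[i]
--         if c not in upside_down_pairs:
--             return False
--         if upside_down_pairs[c] != s[n - 1 - i]:
--             return False
--     return True
-- ===== Notes on version B (the rewrite author's own statement) =====
-- stated objective: alternative
-- what changed: Replaces A's build-mapped-string-then-compare-to-reversal with a two-pointer scan over only the first half of the digits, checking pairs[s[i]] == s[n-1-i] with no auxiliary string.
import Mathlib
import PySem

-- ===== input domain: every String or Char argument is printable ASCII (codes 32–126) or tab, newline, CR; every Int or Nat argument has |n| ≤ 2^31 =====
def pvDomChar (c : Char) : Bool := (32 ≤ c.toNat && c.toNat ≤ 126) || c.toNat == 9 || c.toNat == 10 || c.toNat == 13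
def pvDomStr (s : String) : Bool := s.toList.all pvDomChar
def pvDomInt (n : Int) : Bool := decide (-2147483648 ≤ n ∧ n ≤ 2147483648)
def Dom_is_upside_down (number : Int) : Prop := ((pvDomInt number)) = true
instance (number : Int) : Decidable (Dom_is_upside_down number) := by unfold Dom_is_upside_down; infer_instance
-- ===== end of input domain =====

-- B replaces the build-mapped-string-then-compare-to-reversal with a two-pointer
-- half-scan (alternative decomposition, same cost); return value only, no mutation.

-- the dict {'0':'0','1':'1','6':'9','8':'8','9':'6'} used by both programs
def udPairs (c : Char) : Option Char :=
  if c = '0' then some '0'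
  else if c = '1' then some '1'
  else if c = '6' then some '9'
  else if c = '8' then some '8'
  else if c = '9' then some '6'
  else none

-- ===== PORT A =====
-- A's loop: early-return none on a non-mappable digit, else append the mapped digit
def aLoop : List Char → List Char → Option (List Char)
  | [], acc => some acc
  | c :: rest, acc =>
    match udPairs c with
    | none => none
    | some m => aLoop rest (acc ++ [m])

def is_upside_down (number : Int) : Bool :=
  let s := (PySem.Int.toStr number).toList
  match aLoop s [] with
  | none => false
  | some u => u == s.reverse

-- ===== PORT B =====
-- B's loop over i in range((n+1)//2): membership check, then compare mapped s[i] to s[n-1-i]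
def bLoop (s : List Char) (n : Nat) : List Nat → Bool
  | [] => true
  | i :: rest =>
    let c := s.getD i ' '
    match udPairs c with
    | none => false
    | some m => if m ≠ s.getD (n - 1 - i) ' ' then false else bLoop s n rest

def is_upside_down_alt (number : Int) : Bool :=
  let s := (PySem.Int.toStr number).toList
  let n := s.length
  bLoop s n (List.range ((n + 1) / 2))

-- ===== PRECONDITION & SPEC =====
def Spec_is_upside_down (number : Int) (out : Bool) : Prop := out = is_upside_down_alt number
instance (number : Int) (out : Bool) : Decidable (Spec_is_upside_down number out) := by unfold Spec_is_upside_down; infer_instance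

-- ===== CLAIM (what is proved, stated in full; the proofs are below) =====
def Claim_equal_is_upside_down : Prop := ∀ (number : Int), Dom_is_upside_down number → Spec_is_upside_down number (is_upside_down number)

-- ===== LEMMAS AND PROOFS =====

-- proof-only restatement of A's loop without the accumulator
def mapOpt : List Char → Option (List Char)
  | [] => some []
  | c :: rest =>
    match udPairs c with
    | none => none
    | some m => (mapOpt rest).map (m :: ·)

theorem udPairs_invol {a b : Char} (h : udPairs a = some b) : udPairs b = some a := by
  unfold udPairs at h ⊢
  split_ifs at h <;> simp_all <;> subst h <;> simp

theorem aLoop_eq (s : List Char) : ∀ acc, aLoop s acc = (mapOpt s).map (acc ++ ·) := by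
  induction s with
  | nil => intro acc; simp [aLoop, mapOpt]
  | cons c rest ih =>
    intro acc
    simp only [aLoop, mapOpt]
    cases udPairs c with
    | none => simp
    | some m =>
      simp only [ih]
      cases mapOpt rest <;> simp

theorem mapOpt_some_iff (s t : List Char) :
    mapOpt s = some t ↔
      (t.length = s.length ∧ ∀ i < s.length, udPairs (s.getD i ' ') = some (t.getD i ' ')) := by
  induction s generalizing t with
  | nil =>
    simp only [mapOpt, List.length_nil, Option.some.injEq]
    constructor
    · rintro rfl; simp
    · rintro ⟨hl, _⟩; exact (List.eq_nil_of_length_eq_zero hl).symm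
  | cons c rest ih =>
    simp only [mapOpt]
    cases hc : udPairs c with
    | none =>
      simp only [List.length_cons]
      constructor
      · intro h; cases h
      · rintro ⟨_, h⟩
        have := h 0 (by simp)
        simp [hc] at this
    | some m =>
      cases ht : mapOpt rest with
      | none =>
        simp only [Option.map_none]
        constructor
        · intro h; cases h
        · rintro ⟨hl, h⟩
          cases t with
          | nil => simp at hl
          | cons x xs =>
            have : mapOpt rest = some xs := by
              rw [ih]
              refine ⟨by simpa using hl, fun i hi => ?_⟩
              have := h (i + 1) (by simpa using Nat.succ_lt_succ hi)
              simpa using this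
            rw [ht] at this; cases this
      | some ms =>
        simp only [Option.map_some, Option.some.injEq]
        constructor
        · rintro rfl
          have hrest := (ih ms).mp ht
          refine ⟨by simp [hrest.1], fun i hi => ?_⟩
          cases i with
          | zero => simpa using hc
          | succ j =>
            have := hrest.2 j (by simpa using Nat.lt_of_succ_lt_succ hi)
            simpa using this
        · rintro ⟨hl, h⟩
          cases t with
          | nil => simp at hl
          | cons x xs =>
            have hx : x = m := by
              have := h 0 (by simp)
              simp [hc] at this; exact this.symm
            have hxs : mapOpt rest = some xs := by
              rw [ih]
              refine ⟨by simpa using hl, fun i hi => ?_⟩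
              have := h (i + 1) (by simpa using Nat.succ_lt_succ hi)
              simpa using this
            rw [ht] at hxs
            cases hxs
            simp [hx]

theorem bLoop_iff (s : List Char) (n : Nat) (il : List Nat) :
    bLoop s n il = true ↔
      ∀ i ∈ il, udPairs (s.getD i ' ') = some (s.getD (n - 1 - i) ' ') := by
  induction il with
  | nil => simp [bLoop]
  | cons i rest ih =>
    simp only [bLoop]
    cases hc : udPairs (s.getD i ' ') with
    | none =>
      simp only [List.mem_cons]
      constructor
      · intro h; cases h
      · intro h
        have := h i (Or.inl rfl)
        rw [hc] at this; cases this
    | some m =>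
      have hred : (match some m with
          | none => false
          | some m => if m ≠ s.getD (n - 1 - i) ' ' then false else bLoop s n rest)
          = (if m ≠ s.getD (n - 1 - i) ' ' then false else bLoop s n rest) := rfl
      rw [hred]
      by_cases hm : m = s.getD (n - 1 - i) ' '
      · rw [if_neg (by simp [hm])]
        rw [ih]
        constructor
        · intro h j hj
          rcases List.mem_cons.mp hj with rfl | hj
          · rw [hc, hm]
          · exact h j hj
        · intro h j hj; exact h j (List.mem_cons_of_mem _ hj)
      · rw [if_pos hm]
        constructor
        · intro h; cases h
        · intro h
          have := h i (List.mem_cons_self ..)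
          rw [hc] at this
          exact absurd (Option.some.inj this) hm

theorem getD_reverse (s : List Char) (i : Nat) (h : i < s.length) :
    s.reverse.getD i ' ' = s.getD (s.length - 1 - i) ' ' := by
  rw [List.getD_eq_getElem _ _ (by simpa using h),
      List.getD_eq_getElem _ _ (by omega), List.getElem_reverse]

theorem core (s : List Char) :
    ((match aLoop s [] with
      | none => false
      | some u => u == s.reverse) : Bool)
      = bLoop s s.length (List.range ((s.length + 1) / 2)) := by
  rw [Bool.eq_iff_iff]
  set n := s.length with hn
  have hB := bLoop_iff s n (List.range ((n + 1) / 2))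
  have hA : (match aLoop s [] with
      | none => false
      | some u => u == s.reverse) = true ↔ mapOpt s = some s.reverse := by
    rw [aLoop_eq]
    cases h : mapOpt s with
    | none => simp
    | some u => simp [beq_iff_eq]
  rw [hA, hB, mapOpt_some_iff]
  constructor
  · rintro ⟨_, h⟩ i hi
    have hi2 : i < n := by
      have := List.mem_range.mp hi; omega
    rw [← getD_reverse s i (by omega)]
    exact h i hi2
  · intro h
    refine ⟨by simp, fun i hi => ?_⟩
    rw [getD_reverse s i hi]
    by_cases hhalf : i < (n + 1) / 2
    · exact h i (List.mem_range.mpr hhalf)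
    · have hj : n - 1 - i < (n + 1) / 2 := by omega
      have := h (n - 1 - i) (List.mem_range.mpr hj)
      have hii : n - 1 - (n - 1 - i) = i := by omega
      rw [hii] at this
      exact udPairs_invol this

-- ===== VERDICT (by name: the statement is the Claim_ definition above) =====
theorem is_upside_down_spec : Claim_equal_is_upside_down := by
  intro number _
  unfold Spec_is_upside_down is_upside_down is_upside_down_alt
  exact core ((PySem.Int.toStr number).toList)
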